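-- pv_equiv track=rewrite | github.com/pypi-data/pypi-mirror-397 | packages/chloros-sdk/chloros_sdk-1.0.0.tar.gz/chloros_sdk-1.0.0/remove_remaining_debug.py | remove_console_log
-- ===== SOURCE A (Python) =====
-- def remove_console_log(content, patterns):
--     """Remove console.log/console.trace statements containing any of the patterns"""
--     lines = content.split('\n')
--     result = []
--     removed_count = 0
--     i = 0
--
--     while i < len(lines):
--         line = lines[i]
--
--         # Check if this line should be removed
--         should_remove = False
--         for pattern in patterns:
--             if pattern in line and ('console.log' in line or 'console.trace' in line or 'console.error' in line):
--                 should_remove = True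
--                 break
--
--         if should_remove:
--             removed_count += 1
--             # Check if multi-line
--             if not (');' in line or line.strip().endswith(');\n') or line.strip().endswith(');')):
--                 # Multi-line - skip until closing
--                 paren_count = line.count('(') - line.count(')')
--                 i += 1
--                 while i < len(lines) and paren_count != 0:
--                     paren_count += lines[i].count('(') - lines[i].count(')')
--                     i += 1
--                 continue
--             i += 1
--             continue
--
--         result.append(line)
--         i += 1
--
--     return '\n'.join(result), removed_count
-- ===== SOURCE B (Python) =====
-- def remove_console_log(content, patterns):
--     """Precompute paren-balance prefix sums and a 'next equal prefix' jump table (one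
--     backward pass with a dict), so each multi-line removal jumps straight to its closing
--     line instead of running A's inner while scan."""
--     lines = content.split('\n')
--     n = len(lines)
--     prefix = [0]
--     for line in lines:
--         prefix.append(prefix[-1] + line.count('(') - line.count(')'))
--     seen = {}
--     nxt = [n] * n
--     for j in range(n - 1, -1, -1):
--         nxt[j] = seen.get(prefix[j], n)
--         seen[prefix[j]] = j
--     result = []
--     removed = 0
--     i = 0
--     while i < n:
--         line = lines[i]
--         if any(p in line for p in patterns) and (
--                 'console.log' in line or 'console.trace' in line or 'console.error' in line):
--             removed += 1
--             if ');' in line or line.strip().endswith(');\n') or line.strip().endswith(');'):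
--                 i += 1
--             else:
--                 i = nxt[i]
--         else:
--             result.append(line)
--             i += 1
--     return '\n'.join(result), removed
-- ===== Notes on version B (the rewrite author's own statement) =====
-- stated objective: alternative
-- what changed: Replaces A's on-the-fly inner while scan for the closing line by a staged algorithm: one pass builds paren-balance prefix sums, one backward pass with a dict builds a 'next line with equal prefix' jump table, and the emit loop jumps each multi-line removal to its closing line via the table.
import Mathlib
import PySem

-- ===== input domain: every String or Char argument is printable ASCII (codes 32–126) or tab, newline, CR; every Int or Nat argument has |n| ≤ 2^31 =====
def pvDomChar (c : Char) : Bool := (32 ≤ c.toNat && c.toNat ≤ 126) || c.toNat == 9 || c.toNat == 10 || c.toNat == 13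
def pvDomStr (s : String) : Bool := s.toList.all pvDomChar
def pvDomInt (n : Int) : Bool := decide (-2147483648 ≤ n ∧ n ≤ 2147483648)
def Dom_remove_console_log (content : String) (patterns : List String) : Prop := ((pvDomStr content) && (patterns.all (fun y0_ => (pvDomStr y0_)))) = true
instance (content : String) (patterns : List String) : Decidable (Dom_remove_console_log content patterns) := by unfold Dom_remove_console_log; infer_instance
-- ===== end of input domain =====

-- B replaces A's on-the-fly inner skip scan by a staged algorithm: one pass of
-- paren-balance prefix sums, one backward dict pass building a 'next line with equal
-- prefix' jump table, and an emit loop that jumps each multi-line removal straight to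
-- its closing line; return values are proved equal.

-- ===== PORT A =====
-- 'console.log'/'trace'/'error' membership test shared verbatim by both Pythons
def pvIsConsole (line : String) : Bool :=
  PySem.Str.isIn "console.log" line || PySem.Str.isIn "console.trace" line ||
    PySem.Str.isIn "console.error" line

-- A's verbatim self-close guard: ');' in line or line.strip().endswith(');\n') or line.strip().endswith(');')
def pvSelfClose (line : String) : Bool :=
  PySem.Str.isIn ");" line || PySem.Str.endswith (PySem.Str.strip line) ");\n" ||
    PySem.Str.endswith (PySem.Str.strip line) ");"

-- line.count('(') - line.count(')')
def pvParenDelta (line : String) : Int :=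
  (PySem.Str.count line "(" : Int) - (PySem.Str.count line ")" : Int)

-- A's 'for pattern in patterns: … break' loop
def pvShouldRemoveA (line : String) : List String → Bool
  | [] => false
  | p :: ps => if PySem.Str.isIn p line && pvIsConsole line then true else pvShouldRemoveA line ps

-- A's inner 'while i < len(lines) and paren_count != 0' loop: returns the final i
def pvSkipA (lines : List String) (i : Nat) (pc : Int) : Nat :=
  if _h : i < lines.length ∧ pc ≠ 0 then
    pvSkipA lines (i + 1) (pc + pvParenDelta lines[i])
  else i
termination_by lines.length - i
decreasing_by exact Nat.sub_succ_lt_self lines.length i _h.1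

theorem pvSkipA_ge (lines : List String) (i : Nat) (pc : Int) : i ≤ pvSkipA lines i pc := by
  unfold pvSkipA
  split
  · exact le_trans (Nat.le_succ i) (pvSkipA_ge lines (i + 1) _)
  · exact le_refl i
termination_by lines.length - i

-- A's outer 'while i < len(lines)' loop over state (i, result, removed_count)
def pvLoopA (patterns lines : List String) (i : Nat) (result : List String) (cnt : Int) :
    String × Int :=
  if h : i < lines.length then
    let line := lines[i]
    if pvShouldRemoveA line patterns then
      if !pvSelfClose line then
        pvLoopA patterns lines (pvSkipA lines (i + 1) (pvParenDelta line)) result (cnt + 1)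
      else
        pvLoopA patterns lines (i + 1) result (cnt + 1)
    else
      pvLoopA patterns lines (i + 1) (result ++ [line]) cnt
  else (PySem.Str.join "\n" result, cnt)
termination_by lines.length - i
decreasing_by
  · exact Nat.lt_of_le_of_lt
      (Nat.sub_le_sub_left (pvSkipA_ge lines (i + 1) (pvParenDelta lines[i])) lines.length)
      (Nat.sub_succ_lt_self lines.length i h)
  · exact Nat.sub_succ_lt_self lines.length i h
  · exact Nat.sub_succ_lt_self lines.length i h

def remove_console_log (content : String) (patterns : List String) : String × Int :=
  pvLoopA patterns ((PySem.Str.split? content "\n").getD []) 0 [] 0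

-- ===== PORT B =====
-- Source B stage 1: 'prefix = [0]; for line in lines: prefix.append(prefix[-1] + …)'
def pvPrefixLoop (lines : List String) : List Int :=
  lines.foldl (fun acc line => acc ++ [PySem.List.pyGetD acc (-1) 0 + pvParenDelta line]) [0]

-- Source B stage 2: 'for j in range(n-1,-1,-1): nxt[j] = seen.get(prefix[j], n); seen[prefix[j]] = j'
-- structural descending recursion: argument m+1 processes j = m, then recurses on m
def pvNxtLoop (pfx : List Int) (n : Nat) : Nat → List Int → PySem.Dict Int Int → List Int
  | 0, nxt, _ => nxt
  | m + 1, nxt, seen =>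
      let pj := PySem.List.pyGetD pfx (m : Int) 0
      pvNxtLoop pfx n m (nxt.set m (seen.getD pj (n : Int))) (seen.insert pj (m : Int))

-- 'nxt = [n] * n' then the backward pass
def pvNxt (lines : List String) : List Int :=
  pvNxtLoop (pvPrefixLoop lines) lines.length lines.length
    (List.replicate lines.length (lines.length : Int)) PySem.Dict.empty

-- Source B stage 3, the emit 'while i < n' loop; 'i = nxt[i]' reads the table (i is always in
-- range there). The 'max (i+1) …' is a termination guard only: the built table always
-- satisfies nxt[i] ≥ i+1 (lemma pvNextFrom_ge below), so on B's actual calls it is the identity.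
def pvLoopB (patterns lines : List String) (nxt : List Int) (i : Nat) (result : List String)
    (cnt : Int) : String × Int :=
  if h : i < lines.length then
    let line := lines[i]
    if (patterns.any fun p => PySem.Str.isIn p line) && pvIsConsole line then
      if pvSelfClose line then
        pvLoopB patterns lines nxt (i + 1) result (cnt + 1)
      else
        pvLoopB patterns lines nxt (max (i + 1) (PySem.List.pyGetD nxt (i : Int) 0).toNat)
          result (cnt + 1)
    else
      pvLoopB patterns lines nxt (i + 1) (result ++ [line]) cnt
  else (PySem.Str.join "\n" result, cnt)
termination_by lines.length - i
decreasing_by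
  · exact Nat.sub_succ_lt_self lines.length i h
  · exact Nat.lt_of_le_of_lt
      (Nat.sub_le_sub_left (Nat.le_max_left (i + 1) (PySem.List.pyGetD nxt (i : Int) 0).toNat)
        lines.length)
      (Nat.sub_succ_lt_self lines.length i h)
  · exact Nat.sub_succ_lt_self lines.length i h

def remove_console_log_alt (content : String) (patterns : List String) : String × Int :=
  let lines := (PySem.Str.split? content "\n").getD []
  pvLoopB patterns lines (pvNxt lines) 0 [] 0

-- ===== PRECONDITION & SPEC =====
def Spec_remove_console_log (content : String) (patterns : List String) (out : String × Int) : Prop := out = remove_console_log_alt content patterns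
instance (content : String) (patterns : List String) (out : String × Int) : Decidable (Spec_remove_console_log content patterns out) := by unfold Spec_remove_console_log; infer_instance

-- ===== CLAIM (what is proved, stated in full; the proofs are below) =====
def Claim_equal_remove_console_log : Prop := ∀ (content : String) (patterns : List String), Dom_remove_console_log content patterns → Spec_remove_console_log content patterns (remove_console_log content patterns)

-- ===== LEMMAS AND PROOFS =====

-- spec of the prefix list: P k = sum of paren deltas of the first k lines
def pvP (lines : List String) (k : Nat) : Int := ((lines.take k).map pvParenDelta).sum

-- the tail of the prefix list built from running value s
def pvPrefixFrom (s : Int) : List String → List Int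
  | [] => []
  | x :: xs => (s + pvParenDelta x) :: pvPrefixFrom (s + pvParenDelta x) xs

-- first k in [m, n) with P k = t, else n
def pvNextFrom (lines : List String) (t : Int) (m : Nat) : Nat :=
  if _h : m < lines.length then
    (if pvP lines m = t then m else pvNextFrom lines t (m + 1))
  else lines.length
termination_by lines.length - m
decreasing_by exact Nat.sub_succ_lt_self lines.length m _h

theorem pvP_succ (lines : List String) (m : Nat) (h : m < lines.length) :
    pvP lines (m + 1) = pvP lines m + pvParenDelta lines[m] := by
  unfold pvP
  rw [List.map_take, List.map_take, List.sum_take_succ _ m (by simpa using h)]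
  simp

theorem pvPrefixLoop_from (l : List String) :
    ∀ (acc : List Int) (s : Int),
      l.foldl (fun acc line => acc ++ [PySem.List.pyGetD acc (-1) 0 + pvParenDelta line])
          (acc ++ [s]) =
        (acc ++ [s]) ++ pvPrefixFrom s l := by
  induction l with
  | nil => intro acc s; simp [pvPrefixFrom]
  | cons x xs ih =>
    intro acc s
    simp only [List.foldl_cons, pvPrefixFrom]
    rw [PySem.List.pyGetD_neg_one_append_singleton]
    have h := ih (acc ++ [s]) (s + pvParenDelta x)
    simpa using h

theorem pvPrefix_getD (l : List String) :
    ∀ (k : Nat) (s : Int), k ≤ l.length →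
      (s :: pvPrefixFrom s l).getD k 0 = s + pvP l k := by
  induction l with
  | nil =>
    intro k s hk
    have hk0 : k = 0 := by simpa using hk
    subst hk0
    simp [pvP]
  | cons x xs ih =>
    intro k s hk
    cases k with
    | zero => simp [pvP]
    | succ k =>
      have h := ih k (s + pvParenDelta x) (by simpa using hk)
      simp only [pvPrefixFrom, List.getD_cons_succ]
      rw [h]
      simp only [pvP, List.take_succ_cons, List.map_cons, List.sum_cons]
      ring

theorem pvPrefixLoop_eq (l : List String) : pvPrefixLoop l = 0 :: pvPrefixFrom 0 l := by
  have h := pvPrefixLoop_from l [] 0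
  simpa [pvPrefixLoop] using h

theorem pvPrefixLoop_getD (l : List String) (k : Nat) (hk : k ≤ l.length) :
    PySem.List.pyGetD (pvPrefixLoop l) (k : Int) 0 = pvP l k := by
  rw [PySem.List.pyGetD_natCast, pvPrefixLoop_eq]
  have h := pvPrefix_getD l k 0 hk
  simpa using h

theorem pvNextFrom_ge (lines : List String) (t : Int) (m : Nat) (hm : m ≤ lines.length) :
    m ≤ pvNextFrom lines t m ∧ pvNextFrom lines t m ≤ lines.length := by
  unfold pvNextFrom
  split
  · split
    · omega
    · have := pvNextFrom_ge lines t (m + 1) (by omega)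
      omega
  · omega
termination_by lines.length - m

theorem pvNextFrom_here (lines : List String) {t : Int} {m : Nat} (h : m < lines.length)
    (ht : pvP lines m = t) : pvNextFrom lines t m = m := by
  rw [pvNextFrom, dif_pos h, if_pos ht]

theorem pvNextFrom_step (lines : List String) {t : Int} {m : Nat} (h : m < lines.length)
    (ht : pvP lines m ≠ t) : pvNextFrom lines t m = pvNextFrom lines t (m + 1) := by
  rw [pvNextFrom, dif_pos h, if_neg ht]

theorem pvNextFrom_end (lines : List String) {t : Int} {m : Nat} (h : ¬ m < lines.length) :
    pvNextFrom lines t m = lines.length := by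
  rw [pvNextFrom, dif_neg h]

-- the dict invariant of the backward pass: seen holds, for each prefix value, the first
-- index ≥ m (below n) carrying it
def pvSeenInv (lines : List String) (m : Nat) (seen : PySem.Dict Int Int) : Prop :=
  ∀ v : Int, seen.getD v (lines.length : Int) = (pvNextFrom lines v m : Int)

theorem pvNxtLoop_char (lines : List String) :
    ∀ (m : Nat) (nxt : List Int) (seen : PySem.Dict Int Int),
      m ≤ lines.length → nxt.length = lines.length → pvSeenInv lines m seen →
      ∀ j : Nat, j < lines.length →
        (pvNxtLoop (pvPrefixLoop lines) lines.length m nxt seen).getD j 0 =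
          if j < m then (pvNextFrom lines (pvP lines j) (j + 1) : Int) else nxt.getD j 0 := by
  intro m
  induction m with
  | zero =>
    intro nxt seen _ _ _ j hj
    simp [pvNxtLoop]
  | succ m ih =>
    intro nxt seen hm hlen hinv j hj
    have hmn : m < lines.length := by omega
    have hpj : PySem.List.pyGetD (pvPrefixLoop lines) (m : Int) 0 = pvP lines m :=
      pvPrefixLoop_getD lines m (by omega)
    simp only [pvNxtLoop, hpj]
    have hinv' : pvSeenInv lines m (seen.insert (pvP lines m) (m : Int)) := by
      intro v
      rw [PySem.Dict.getD_insert]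
      by_cases hv : v = pvP lines m
      · rw [if_pos hv, pvNextFrom_here lines hmn hv.symm]
      · rw [if_neg hv, hinv v, pvNextFrom_step lines hmn (fun h => hv h.symm)]
    have hset : (nxt.set m (seen.getD (pvP lines m) (lines.length : Int))).length =
        lines.length := by simpa using hlen
    have h := ih (nxt.set m (seen.getD (pvP lines m) (lines.length : Int)))
      (seen.insert (pvP lines m) (m : Int)) (by omega) hset hinv' j hj
    rw [h]
    by_cases hjm : j < m
    · rw [if_pos hjm, if_pos (by omega)]
    · by_cases hje : j = m
      · subst hje
        rw [if_neg hjm, if_pos (by omega)]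
        rw [hinv (pvP lines j)]
        have hjlen : j < nxt.length := by omega
        rw [List.getD_eq_getElem?_getD, List.getElem?_set_self (by omega)]
        simp
      · rw [if_neg hjm, if_neg (by omega)]
        rw [List.getD_eq_getElem?_getD, List.getD_eq_getElem?_getD,
          List.getElem?_set_ne (by omega)]

theorem pvNxt_getD (lines : List String) (j : Nat) (hj : j < lines.length) :
    PySem.List.pyGetD (pvNxt lines) (j : Int) 0 =
      (pvNextFrom lines (pvP lines j) (j + 1) : Int) := by
  rw [PySem.List.pyGetD_natCast]
  unfold pvNxt
  have hinv : pvSeenInv lines lines.length PySem.Dict.empty := by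
    intro v
    rw [PySem.Dict.getD_empty, pvNextFrom_end lines (by omega)]
  have h := pvNxtLoop_char lines lines.length
    (List.replicate lines.length (lines.length : Int)) PySem.Dict.empty
    (le_refl _) (by simp) hinv j hj
  rw [h, if_pos hj]

-- A's inner skip loop computes 'first k ≥ m with P k = t, else n' when pc = P m - t
theorem pvSkipA_eq_next (lines : List String) (m : Nat) (t : Int) (hm : m ≤ lines.length) :
    pvSkipA lines m (pvP lines m - t) = pvNextFrom lines t m := by
  by_cases hmn : m < lines.length
  · by_cases hpc : pvP lines m - t = 0
    · rw [pvSkipA, dif_neg (by simp [hpc]), pvNextFrom_here lines hmn (by omega)]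
    · rw [pvSkipA, dif_pos ⟨hmn, hpc⟩, pvNextFrom_step lines hmn (by omega)]
      have hrec : pvP lines m - t + pvParenDelta lines[m] = pvP lines (m + 1) - t := by
        rw [pvP_succ lines m hmn]; ring
      rw [hrec]
      exact pvSkipA_eq_next lines (m + 1) t (by omega)
  · rw [pvSkipA, dif_neg (by simp [hmn]), pvNextFrom_end lines hmn]
    omega
termination_by lines.length - m

theorem pvShouldRemoveA_eq (line : String) (patterns : List String) :
    pvShouldRemoveA line patterns =
      ((patterns.any fun p => PySem.Str.isIn p line) && pvIsConsole line) := by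
  induction patterns with
  | nil => simp [pvShouldRemoveA]
  | cons p ps ih =>
    simp only [pvShouldRemoveA, List.any_cons, ih]
    cases PySem.Str.isIn p line <;> cases pvIsConsole line <;>
      cases (ps.any fun p => PySem.Str.isIn p line) <;> simp

-- the two outer loops agree
theorem pvLoop_eq (patterns lines : List String) (i : Nat) (result : List String) (cnt : Int) :
    pvLoopA patterns lines i result cnt = pvLoopB patterns lines (pvNxt lines) i result cnt := by
  unfold pvLoopA pvLoopB
  by_cases h : i < lines.length
  · rw [dif_pos h, dif_pos h]
    simp only [pvShouldRemoveA_eq]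
    by_cases hrem : ((patterns.any fun p => PySem.Str.isIn p lines[i]) && pvIsConsole lines[i]) = true
    · rw [if_pos hrem, if_pos hrem]
      by_cases hsc : pvSelfClose lines[i] = true
      · rw [hsc, if_pos rfl]
        simp only [Bool.not_true, Bool.false_eq_true, if_false]
        exact pvLoop_eq patterns lines (i + 1) result (cnt + 1)
      · have hscf : pvSelfClose lines[i] = false := by simpa using hsc
        rw [hscf]
        simp only [Bool.not_false, if_true, Bool.false_eq_true, if_false]
        have hskip : pvSkipA lines (i + 1) (pvParenDelta lines[i]) =
            pvNextFrom lines (pvP lines i) (i + 1) := by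
          have hpc : pvParenDelta lines[i] = pvP lines (i + 1) - pvP lines i := by
            rw [pvP_succ lines i h]; ring
          rw [hpc]
          exact pvSkipA_eq_next lines (i + 1) (pvP lines i) (by omega)
        have hjump : max (i + 1) (PySem.List.pyGetD (pvNxt lines) (i : Int) 0).toNat =
            pvNextFrom lines (pvP lines i) (i + 1) := by
          rw [pvNxt_getD lines i h]
          have hge := pvNextFrom_ge lines (pvP lines i) (i + 1) (by omega)
          simp only [Int.toNat_natCast]
          omega
        rw [hskip, hjump]
        exact pvLoop_eq patterns lines (pvNextFrom lines (pvP lines i) (i + 1)) result (cnt + 1)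
    · rw [if_neg hrem, if_neg hrem]
      exact pvLoop_eq patterns lines (i + 1) (result ++ [lines[i]]) cnt
  · rw [dif_neg h, dif_neg h]
termination_by lines.length - i
decreasing_by
  · omega
  · have hge := pvNextFrom_ge lines (pvP lines i) (i + 1) (by omega)
    omega
  · omega

-- ===== VERDICT (by name: the statement is the Claim_ definition above) =====
theorem remove_console_log_spec : Claim_equal_remove_console_log := by
  intro content patterns _
  unfold Spec_remove_console_log remove_console_log remove_console_log_alt
  exact pvLoop_eq patterns ((PySem.Str.split? content "\n").getD []) 0 [] 0
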